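-- pv_equiv track=rewrite | github.com/sneefyyy/DSL | generators/symmetry_complete_generator.py | complete_horizontal_symmetry
-- ===== SOURCE A (Python) =====
-- import copy
--
-- def complete_horizontal_symmetry(grid):
--     """
--     Complete horizontal symmetry (mirror across vertical axis in center).
--     Assumes left half is given, completes right half.
--     """
--     result = copy.deepcopy(grid)
--     rows = len(result)
--     cols = len(result[0]) if rows > 0 else 0
--
--     # Mirror from left to right
--     for row in range(rows):
--         for col in range(cols // 2):
--             # Copy left side to right side
--             result[row][cols - 1 - col] = result[row][col]
--
--     return result
-- ===== SOURCE B (Python) =====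
-- def complete_horizontal_symmetry(grid):
--     """
--     Complete horizontal symmetry (mirror across vertical axis in center).
--     Assumes left half is given, completes right half.
--     """
--     if not grid:
--         return []
--     cols = len(grid[0])
--     h = cols // 2
--     return [row[:cols - h] + row[:h][::-1] + row[cols:] for row in grid]
-- ===== Notes on version B (the rewrite author's own statement) =====
-- stated objective: simpler
-- what changed: Replaces deepcopy plus a nested per-cell index-assignment loop over the right half with building each output row directly by slice concatenation: left prefix + reversed left half + untouched tail.
import Mathlib
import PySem

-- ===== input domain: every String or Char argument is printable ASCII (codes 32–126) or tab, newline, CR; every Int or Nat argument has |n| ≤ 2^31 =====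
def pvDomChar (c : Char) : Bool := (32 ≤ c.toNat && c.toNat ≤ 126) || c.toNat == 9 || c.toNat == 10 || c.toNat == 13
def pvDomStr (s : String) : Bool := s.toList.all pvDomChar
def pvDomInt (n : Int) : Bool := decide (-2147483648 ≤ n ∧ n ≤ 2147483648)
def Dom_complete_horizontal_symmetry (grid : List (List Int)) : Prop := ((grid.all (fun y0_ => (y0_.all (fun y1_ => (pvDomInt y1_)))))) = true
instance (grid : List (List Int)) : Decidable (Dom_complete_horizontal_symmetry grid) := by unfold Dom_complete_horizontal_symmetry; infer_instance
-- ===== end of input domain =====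

-- B replaces the nested per-cell index-assignment loop with per-row slice concatenation (simpler decomposition, same output).

-- ===== PORT A =====
-- result[i] = v on a Python list (index known in range under Pre_; out of range = IndexError, excluded by Pre_)
def pvSetA (l : List Int) (i : Int) (v : Int) : List Int :=
  match PySem.List.pyIdx? l.length i with
  | some n => l.set n v
  | none => l

-- the inner 'for col in range(cols // 2)' loop mutating one row
def pvInnerA (cols : Int) (r : List Int) : List Int :=
  (PySem.List.pyRange 0 (PySem.Int.floordiv cols 2) 1).foldl
    (fun acc col => pvSetA acc (cols - 1 - col) (PySem.List.pyGetD acc col 0)) r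

def complete_horizontal_symmetry (grid : List (List Int)) : List (List Int) :=
  let result := grid
  let rows : Int := result.length
  let cols : Int := if 0 < rows then ((result.headD []).length : Int) else 0
  (PySem.List.pyRange 0 rows 1).foldl
    (fun res rowi =>
      match PySem.List.pyIdx? res.length rowi with
      | some n => res.set n (pvInnerA cols (res.getD n []))
      | none => res) result

-- ===== PORT B =====
def complete_horizontal_symmetry_alt (grid : List (List Int)) : List (List Int) :=
  match grid with
  | [] => []
  | r0 :: _ =>
    let cols : Int := r0.length
    let h : Int := PySem.Int.floordiv cols 2
    grid.map (fun row =>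
      PySem.List.slice row none (some (cols - h))
        ++ (PySem.List.slice row none (some h)).reverse
        ++ PySem.List.slice row (some cols) none)

-- ===== PRECONDITION & SPEC =====
-- Pre_ excludes exactly the inputs where A raises IndexError: a grid with ≥ 2 columns (by its first row) containing a shorter row.
def Pre_complete_horizontal_symmetry (grid : List (List Int)) : Prop :=
  2 ≤ (grid.headD []).length → ∀ r ∈ grid, (grid.headD []).length ≤ r.length
instance (grid : List (List Int)) : Decidable (Pre_complete_horizontal_symmetry grid) := by unfold Pre_complete_horizontal_symmetry; infer_instance
def pvWitness_complete_horizontal_symmetry : List (List Int) := [[1, 2, 3, 4], [5, 6, 7, 8]]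

def Spec_complete_horizontal_symmetry (grid : List (List Int)) (out : List (List Int)) : Prop := out = complete_horizontal_symmetry_alt grid
instance (grid : List (List Int)) (out : List (List Int)) : Decidable (Spec_complete_horizontal_symmetry grid out) := by unfold Spec_complete_horizontal_symmetry; infer_instance

-- ===== CLAIM (what is proved, stated in full; the proofs are below) =====
def Claim_equal_complete_horizontal_symmetry : Prop := ∀ (grid : List (List Int)), Dom_complete_horizontal_symmetry grid → Pre_complete_horizontal_symmetry grid → Spec_complete_horizontal_symmetry grid (complete_horizontal_symmetry grid)

-- ===== LEMMAS AND PROOFS =====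

-- the outer loop, updating each row index in turn, is a map over the rows
lemma pv_outer_aux (f : List Int → List Int) (l : List (List Int)) :
    ∀ k, k ≤ l.length →
      ((List.range k).foldl
        (fun res (j : Nat) =>
          match PySem.List.pyIdx? res.length (j : Int) with
          | some n => res.set n (f (res.getD n []))
          | none => res) l) = (l.take k).map f ++ l.drop k := by
  intro k
  induction k with
  | zero => simp
  | succ k ih =>
    intro hk
    rw [List.range_succ, List.foldl_append, ih (by omega)]
    have hk' : k < l.length := by omega
    have hmin : min k l.length = k := by omega
    have hlenmap : ((l.take k).map f).length = k := by simp [hmin]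
    have hidx : PySem.List.pyIdx? ((l.take k).map f ++ l.drop k).length (k : Int) = some k := by
      simp [PySem.List.pyIdx?]; omega
    simp only [List.foldl_cons, List.foldl_nil, hidx]
    have hdrop : l.drop k = l[k] :: l.drop (k + 1) := List.drop_eq_getElem_cons hk'
    have hgd : ((l.take k).map f ++ l.drop k).getD k [] = l[k] := by
      rw [List.getD_eq_getElem?_getD, List.getElem?_append_right (by omega), hlenmap, hdrop]
      simp [List.getElem?_eq_getElem hk']
    rw [hgd, List.set_append, if_neg (by simp [hmin]), hlenmap, Nat.sub_self, hdrop,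
      List.set_cons_zero]
    rw [List.take_add_one, List.getElem?_eq_getElem hk']
    simp
    rw [List.take_add_one, List.getElem?_map, List.getElem?_eq_getElem hk']
    simp

lemma pv_outer (f : List Int → List Int) (l : List (List Int)) :
    (PySem.List.pyRange 0 (l.length : Int) 1).foldl
      (fun res rowi =>
        match PySem.List.pyIdx? res.length rowi with
        | some n => res.set n (f (res.getD n []))
        | none => res) l = l.map f := by
  rw [PySem.List.pyRange_zero_natCast, List.foldl_map]
  rw [pv_outer_aux f l l.length le_rfl]
  simp

-- the inner loop on a row of length ≥ c mirrors the left half into the right half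
lemma pv_inner_aux (c : Nat) (row : List Int) (hc : c ≤ row.length) :
    ∀ k, k ≤ c / 2 →
      ((List.range k).foldl
        (fun acc (j : Nat) => pvSetA acc ((c : Int) - 1 - (j : Int)) (PySem.List.pyGetD acc (j : Int) 0)) row)
        = row.take (c - k) ++ (row.take k).reverse ++ row.drop c := by
  intro k
  induction k with
  | zero => simp [List.take_append_drop]
  | succ k ih =>
    intro hk
    rw [List.range_succ, List.foldl_append, ih (by omega)]
    simp only [List.foldl_cons, List.foldl_nil]
    have h2k : 2 * (k + 1) ≤ c := by
      have := Nat.div_mul_le_self c 2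
      omega
    have hkc : k < row.length := by omega
    have hklt : k < c - k := by omega
    have hlen1 : (row.take (c - k)).length = c - k := by simp; omega
    have hgd : PySem.List.pyGetD (row.take (c - k) ++ (row.take k).reverse ++ row.drop c) (k : Int) 0
        = row[k] := by
      rw [PySem.List.pyGetD_natCast, List.getD_eq_getElem?_getD, List.append_assoc,
        List.getElem?_append_left (by rw [hlen1]; omega), List.getElem?_take_of_lt hklt,
        List.getElem?_eq_getElem hkc]
      simp
    rw [hgd]
    have hcast : (c : Int) - 1 - (k : Int) = ((c - 1 - k : Nat) : Int) := by omega
    have hidx : PySem.List.pyIdx? (row.take (c - k) ++ (row.take k).reverse ++ row.drop c).length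
        ((c : Int) - 1 - (k : Int)) = some (c - 1 - k) := by
      rw [hcast]
      simp [PySem.List.pyIdx?]
      omega
    unfold pvSetA
    rw [hidx]
    simp only []
    have htk : row.take (c - k) = row.take (c - 1 - k) ++ [row[c - 1 - k]] := by
      have hck : c - k = (c - 1 - k) + 1 := by omega
      rw [hck, List.take_add_one, List.getElem?_eq_getElem (by omega : c - 1 - k < row.length)]
      simp
    rw [List.append_assoc, List.set_append, if_pos (by rw [hlen1]; omega), htk,
      List.set_append, if_neg (by simp)]
    have hz : c - 1 - k - (row.take (c - 1 - k)).length = 0 := by simp; omega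
    rw [hz, List.set_cons_zero]
    have htk1 : (row.take (k + 1)).reverse = row[k] :: (row.take k).reverse := by
      rw [List.take_add_one, List.getElem?_eq_getElem hkc]
      simp
    rw [htk1]
    have hck1 : c - (k + 1) = c - 1 - k := by omega
    rw [hck1]
    simp

-- one row: A's inner loop = B's slice construction (h = 0 needs no length hypothesis)
lemma pv_row (c : Nat) (row : List Int) (h : c / 2 = 0 ∨ c ≤ row.length) :
    pvInnerA (c : Int) row =
      PySem.List.slice row none (some ((c : Int) - PySem.Int.floordiv (c : Int) 2))
        ++ (PySem.List.slice row none (some (PySem.Int.floordiv (c : Int) 2))).reverse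
        ++ PySem.List.slice row (some (c : Int)) none := by
  have hfd : PySem.Int.floordiv (c : Int) 2 = ((c / 2 : Nat) : Int) :=
    PySem.Int.floordiv_natCast c 2
  have hsub : (c : Int) - ((c / 2 : Nat) : Int) = ((c - c / 2 : Nat) : Int) := by
    have := Nat.div_le_self c 2
    omega
  rw [pvInnerA, hfd, hsub,
    PySem.List.slice_to row (by positivity), PySem.List.slice_to row (by positivity),
    PySem.List.slice_from row (by positivity), Int.toNat_natCast, Int.toNat_natCast,
    Int.toNat_natCast, PySem.List.pyRange_zero_natCast, List.foldl_map]
  cases h with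
  | inl h0 =>
    simp [h0, List.take_append_drop]
  | inr hc =>
    have := pv_inner_aux c row hc (c / 2) le_rfl
    simpa using this

-- ===== VERDICT (by name: the statement is the Claim_ definition above) =====
theorem complete_horizontal_symmetry_spec : Claim_equal_complete_horizontal_symmetry := by
  intro grid _ hpre
  unfold Spec_complete_horizontal_symmetry
  cases grid with
  | nil => rfl
  | cons r0 rest =>
    unfold complete_horizontal_symmetry complete_horizontal_symmetry_alt
    have hpos : (0 : Int) < (((r0 :: rest) : List (List Int)).length : Int) := by
      exact_mod_cast Nat.succ_pos rest.length
    dsimp only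
    rw [if_pos hpos]
    simp only [List.headD_cons]
    rw [pv_outer (pvInnerA (r0.length : Int)) (r0 :: rest)]
    apply List.map_congr_left
    intro row hrow
    apply pv_row
    by_cases h2 : 2 ≤ r0.length
    · exact Or.inr (hpre (by simpa using h2) row hrow)
    · left; omega
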